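-- pv_equiv track=rewrite | github.com/nathanlct/cp | project_euler/62.py | int2idx
-- ===== SOURCE A (Python) =====
-- from collections import defaultdict
--
-- def int2idx(n):
--     # give an index to each integer, that is unique modulo permutation (eg id of 55416 = id of 51645)
--     digits = defaultdict(int)
--     for digit in list(str(n)):
--         digits[digit] += 1
--     idx = ''
--     for k in sorted(digits.keys()):
--         idx += f'{digits[k]}*{k},'
--     return idx
-- ===== SOURCE B (Python) =====
-- def int2idx(n):
--     # sort the digits of str(n) and emit one 'count*digit,' chunk per run of equal chars
--     s = sorted(str(n))
--     parts = []
--     i, L = 0, len(s)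
--     while i < L:
--         j = i + 1
--         while j < L and s[j] == s[i]:
--             j += 1
--         parts.append(f'{j - i}*{s[i]},')
--         i = j
--     return ''.join(parts)
-- ===== Notes on version B (the rewrite author's own statement) =====
-- stated objective: alternative
-- what changed: B replaces A's count-into-defaultdict-then-iterate-sorted-keys structure by sorting the characters of str(n) once and emitting one 'count*char,' chunk per consecutive run in a single two-pointer scan, with no dictionary at all.
import Mathlib
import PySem

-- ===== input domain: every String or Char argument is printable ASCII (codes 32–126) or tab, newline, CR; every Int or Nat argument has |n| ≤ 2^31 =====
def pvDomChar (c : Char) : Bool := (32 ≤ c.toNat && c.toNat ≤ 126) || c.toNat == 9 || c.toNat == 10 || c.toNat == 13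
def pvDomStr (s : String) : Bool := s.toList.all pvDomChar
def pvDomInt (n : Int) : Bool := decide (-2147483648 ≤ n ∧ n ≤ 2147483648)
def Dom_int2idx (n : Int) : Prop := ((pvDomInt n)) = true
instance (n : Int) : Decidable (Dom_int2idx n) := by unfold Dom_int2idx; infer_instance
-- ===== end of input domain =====

-- B sorts the characters of str(n) once and emits one 'count*char,' chunk per consecutive run
-- (a two-pointer scan), instead of A's count-into-defaultdict then iterate-sorted-keys; same cost, no dict.

-- ===== PORT A =====
def int2idx (n : Int) : String :=
  -- digits = defaultdict(int); for digit in list(str(n)): digits[digit] += 1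
  let digits : PySem.Dict Char Int :=
    (PySem.Int.toChars n).foldl (fun d c => d.insert c (d.getD c 0 + 1)) PySem.Dict.empty
  -- idx = ''; for k in sorted(digits.keys()): idx += f'{digits[k]}*{k},'
  let idx : List Char :=
    (PySem.List.sorted digits.keys (fun x => x) false).foldl
      (fun acc k => acc ++ (PySem.Int.toChars (digits.getD k 0) ++ ['*', k, ','])) []
  String.ofList idx

-- ===== PORT B =====
-- the inner while loop: one run of equal characters (takeWhile), then continue past it (dropWhile)
def int2idxRuns (t : List Char) : List Char :=
  match t with
  | [] => []
  | c :: rest =>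
      PySem.Int.toChars ((1 : Int) + (rest.takeWhile (fun x => x == c)).length) ++ ['*', c, ','] ++
        int2idxRuns (rest.dropWhile (fun x => x == c))
termination_by t.length
decreasing_by
  exact Nat.lt_succ_of_le (rest.dropWhile_sublist (fun x => x == c)).length_le

def int2idx_alt (n : Int) : String :=
  String.ofList (int2idxRuns (PySem.List.sorted (PySem.Int.toChars n) (fun x => x) false))

-- ===== PRECONDITION & SPEC =====
def Spec_int2idx (n : Int) (out : String) : Prop := out = int2idx_alt n
instance (n : Int) (out : String) : Decidable (Spec_int2idx n out) := by unfold Spec_int2idx; infer_instance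

-- ===== CLAIM (what is proved, stated in full; the proofs are below) =====
def Claim_equal_int2idx : Prop := ∀ (n : Int), Dom_int2idx n → Spec_int2idx n (int2idx n)

-- ===== LEMMAS AND PROOFS =====

-- the chunk emitted for a character k whose multiplicity in s is s.count k
def pvChunk (s : List Char) (k : Char) : List Char :=
  PySem.Int.toChars ((s.count k : Int)) ++ ['*', k, ',']

-- a Set.ofList fold only appends a subsequence of its input
lemma pvFoldlAdd_sublist (l acc : List Char) :
    ∃ u, u.Sublist l ∧ l.foldl PySem.Set.add acc = acc ++ u := by
  induction l generalizing acc with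
  | nil => exact ⟨[], by simp⟩
  | cons x l ih =>
      simp only [List.foldl_cons, PySem.Set.add]
      by_cases h : PySem.Set.contains acc x = true
      · simp only [h, if_true]
        obtain ⟨u, hu, he⟩ := ih acc
        exact ⟨u, hu.cons x, he⟩
      · simp only [h, if_false, Bool.false_eq_true]
        obtain ⟨u, hu, he⟩ := ih (acc ++ [x])
        exact ⟨x :: u, hu.cons₂ x, by simpa using he⟩

lemma pvDedup_sublist (l : List Char) : (PySem.List.dedup l).Sublist l := by
  obtain ⟨u, hu, he⟩ := pvFoldlAdd_sublist l []
  simpa [PySem.List.dedup_eq_ofList, PySem.Set.ofList_eq_foldl, he] using hu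

lemma pvFoldlAdd_cons (l : List Char) (c : Char) (acc : List Char) (h : c ∉ l) :
    l.foldl PySem.Set.add (c :: acc) = c :: l.foldl PySem.Set.add acc := by
  induction l generalizing acc with
  | nil => rfl
  | cons x l ih =>
      have hxc : (x == c) = false := by
        simp only [beq_eq_false_iff_ne]; rintro rfl; exact h (List.mem_cons_self ..)
      have hrest : c ∉ l := fun hm => h (List.mem_cons_of_mem _ hm)
      simp only [List.foldl_cons, PySem.Set.add, PySem.Set.contains, List.contains_cons, hxc,
        Bool.false_or]
      by_cases hc : acc.contains x = true
      · simp only [hc, if_true]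
        exact ih acc hrest
      · simp only [hc, if_false, Bool.false_eq_true]
        have hassoc : c :: acc ++ [x] = c :: (acc ++ [x]) := by simp
        rw [hassoc, ih (acc ++ [x]) hrest]

-- a run of copies of c adds nothing once c is in the set
lemma pvFoldlAdd_run (l acc : List Char) (c : Char) (hall : ∀ x ∈ l, x = c)
    (hc : acc.contains c = true) : l.foldl PySem.Set.add acc = acc := by
  induction l with
  | nil => rfl
  | cons x l ih =>
      have hx : x = c := hall x (List.mem_cons_self ..)
      subst hx
      simp only [List.foldl_cons, PySem.Set.add, PySem.Set.contains, hc, if_true]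
      exact ih (fun y hy => hall y (List.mem_cons_of_mem _ hy))

-- dedup of a sorted list: head, then dedup of everything past the first run
lemma pvDedup_cons_run (c : Char) (rest : List Char)
    (hb : c ∉ rest.dropWhile (fun x => x == c)) :
    PySem.List.dedup (c :: rest) = c :: PySem.List.dedup (rest.dropWhile (fun x => x == c)) := by
  have hsplit : rest.takeWhile (fun x => x == c) ++ rest.dropWhile (fun x => x == c) = rest :=
    List.takeWhile_append_dropWhile
  have h1 : PySem.List.dedup (c :: rest) = rest.foldl PySem.Set.add [c] := by
    simp [PySem.List.dedup_eq_ofList, PySem.Set.ofList_eq_foldl, PySem.Set.add, PySem.Set.contains]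
  rw [h1, ← hsplit, List.foldl_append]
  rw [pvFoldlAdd_run (rest.takeWhile (fun x => x == c)) [c] c
      (fun x hx => by simpa using List.mem_takeWhile_imp hx) (by simp)]
  rw [show ([c] : List Char) = c :: [] from rfl, pvFoldlAdd_cons _ c [] hb]
  simp [PySem.List.dedup_eq_ofList, PySem.Set.ofList_eq_foldl]

-- no copy of the head character survives dropWhile on a sorted list
lemma pvNotMem_drop (c : Char) (rest : List Char) (h : (c :: rest).Pairwise (· ≤ ·)) :
    c ∉ rest.dropWhile (fun x => x == c) := by
  intro hm
  have hsub : (rest.dropWhile (fun x => x == c)).Sublist rest := List.dropWhile_sublist _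
  cases hd : rest.dropWhile (fun x => x == c) with
  | nil => simp [hd] at hm
  | cons y ys =>
      have hne : rest.dropWhile (fun x => x == c) ≠ [] := by simp [hd]
      have hyc := List.head_dropWhile_not (fun x => x == c) hne
      simp only [hd, List.head_cons, beq_eq_false_iff_ne] at hyc
      have hcy : c ≤ y := by
        have hmem : y ∈ rest := hsub.mem (by simp [hd])
        exact (List.pairwise_cons.mp h).1 y hmem
      have hlt : c < y := lt_of_le_of_ne hcy (fun he => hyc he.symm)
      have hpw : (y :: ys).Pairwise (· ≤ ·) := by
        have := ((List.pairwise_cons.mp h).2).sublist hsub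
        rwa [hd] at this
      rw [hd] at hm
      rcases List.mem_cons.mp hm with rfl | hmem
      · exact hyc rfl
      · have : y ≤ c := (List.pairwise_cons.mp hpw).1 c hmem
        exact absurd (lt_of_lt_of_le hlt this) (lt_irrefl c)

-- counting across the head run
lemma pvCount_head (c : Char) (a b : List Char)
    (hall : ∀ x ∈ a, x = c) (hb : c ∉ b) :
    (c :: (a ++ b)).count c = a.length + 1 := by
  rw [List.count_cons_self, List.count_append,
    List.count_eq_length.mpr (fun x hx => (hall x hx).symm),
    List.count_eq_zero.mpr hb]

lemma pvCount_tail (c k : Char) (a b : List Char)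
    (hall : ∀ x ∈ a, x = c) (hk : k ≠ c) :
    (c :: (a ++ b)).count k = b.count k := by
  have ha : a.count k = 0 := List.count_eq_zero.mpr (fun hm => hk (hall k hm))
  simp [List.count_append, ha, hk.symm]

-- B's run scan computes, for a sorted list t, the chunk list over dedup t
lemma pvRuns_eq (t : List Char) (h : t.Pairwise (· ≤ ·)) :
    int2idxRuns t = (PySem.List.dedup t).flatMap (pvChunk t) := by
  induction hn : t.length using Nat.strong_induction_on generalizing t with
  | _ n ih =>
  cases t with
  | nil =>
      rw [int2idxRuns]
      simp [PySem.List.dedup_eq_ofList, PySem.Set.ofList]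
  | cons c rest =>
      have hsplit : rest.takeWhile (fun x => x == c) ++ rest.dropWhile (fun x => x == c) = rest :=
        List.takeWhile_append_dropWhile
      have hall : ∀ x ∈ rest.takeWhile (fun x => x == c), x = c :=
        fun x hx => by simpa using List.mem_takeWhile_imp hx
      have hb : c ∉ rest.dropWhile (fun x => x == c) := pvNotMem_drop c rest h
      have hpwdrop : (rest.dropWhile (fun x => x == c)).Pairwise (· ≤ ·) :=
        ((List.pairwise_cons.mp h).2).sublist (List.dropWhile_sublist _)
      have hlen : (rest.dropWhile (fun x => x == c)).length < n := by
        subst hn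
        exact Nat.lt_succ_of_le (List.dropWhile_sublist _).length_le
      have hIH := ih _ hlen (rest.dropWhile (fun x => x == c)) hpwdrop rfl
      rw [int2idxRuns, hIH, pvDedup_cons_run c rest hb, List.flatMap_cons]
      have hcount : ((1 : Int) + (rest.takeWhile (fun x => x == c)).length)
          = (((c :: rest).count c : Nat) : Int) := by
        conv_rhs => rw [← hsplit]
        rw [pvCount_head c _ _ hall hb]
        push_cast; ring
      have hchunks : ∀ k ∈ PySem.List.dedup (rest.dropWhile (fun x => x == c)),
          pvChunk (rest.dropWhile (fun x => x == c)) k = pvChunk (c :: rest) k := by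
        intro k hk
        have hkmem : k ∈ rest.dropWhile (fun x => x == c) :=
          (PySem.List.mem_dedup _ _).mp hk
        have hkne : k ≠ c := fun he => hb (he ▸ hkmem)
        have : (c :: rest).count k = (rest.dropWhile (fun x => x == c)).count k := by
          conv_lhs => rw [← hsplit]
          exact pvCount_tail c k _ _ hall hkne
        simp only [pvChunk, this]
      rw [List.flatMap_congr hchunks]
      simp only [pvChunk, ← hcount]

-- the A-side fold is the chunk list over sorted(dedup s)
lemma pvA_eq (s : List Char) :
    ((PySem.List.sorted ((PySem.Dict.counter s).keys) (fun x => x) false).foldl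
      (fun acc k => acc ++ (PySem.Int.toChars ((PySem.Dict.counter s).getD k 0)
        ++ ['*', k, ','])) [])
    = (PySem.List.sorted (PySem.List.dedup s) (fun x => x) false).flatMap (pvChunk s) := by
  rw [PySem.Dict.keys_counter, ← PySem.List.dedup_eq_ofList]
  have hcongr : ∀ (acc : List Char) (k : Char),
      k ∈ PySem.List.sorted (PySem.List.dedup s) (fun x => x) false →
      acc ++ (PySem.Int.toChars ((PySem.Dict.counter s).getD k 0) ++ ['*', k, ','])
        = acc ++ pvChunk s k := by
    intro acc k _
    rw [PySem.Dict.getD_counter]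
    simp [pvChunk]
  refine (PySem.List.foldl_congr_mem _ _ _ _ hcongr).trans ?_
  rw [PySem.List.foldl_append_eq_flatMap]
  simp

-- sorted(dedup s) = dedup(sorted s)
lemma pvSortedDedup (s : List Char) :
    PySem.List.sorted (PySem.List.dedup s) (fun x => x) false
      = PySem.List.dedup (PySem.List.sorted s (fun x => x) false) := by
  apply PySem.List.sorted_id_eq_of_perm_of_pairwise
  · apply (List.perm_ext_iff_of_nodup (PySem.List.nodup_dedup _) (PySem.List.nodup_dedup _)).mpr
    intro a
    simp only [PySem.List.mem_dedup, PySem.List.mem_sorted]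
  · exact (PySem.List.sorted_pairwise s (fun x => x)).sublist (pvDedup_sublist _)

theorem int2idx_spec : Claim_equal_int2idx := by
  intro n _
  unfold Spec_int2idx int2idx int2idx_alt
  simp only [PySem.Dict.foldl_insert_getD_add_one_eq_counter]
  congr 1
  rw [pvA_eq (PySem.Int.toChars n), pvRuns_eq _ (PySem.List.sorted_pairwise (PySem.Int.toChars n) (fun x => x)), pvSortedDedup]
  apply List.flatMap_congr
  intro k _
  simp only [pvChunk]
  rw [(PySem.List.sorted_perm (PySem.Int.toChars n) (fun x => x) false).count_eq k]
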